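-- pv_equiv track=rewrite | github.com/socathie/CodeFights | CompanyBots/2sigma/computerNetwork.py | computerNetwork
-- ===== SOURCE A (Python) =====
-- def computerNetwork(n, network):
--     if n == 1:
--         return 0
--     dp = [100000 for col in range(n)]
--
--     dummy = list(network)
--     network = []
--     for i in range(len(dummy)):
--         temp = sorted(dummy[i][:2])
--         network.append([])
--         network[i].append(temp[0])
--         network[i].append(temp[1])
--         network[i].append(dummy[i][2])
--     network = sorted(network,key = lambda x: (x[0],x[1]))
--     for i in range(n):
--         for x in network:
--             if x[1]==i+1 and x[0]==1:
--                 dp[i] = x[2]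
--
--     for i in range(n):
--         m = dp[i]
--         for j in range(i):
--             for x in network:
--                 if x[1]==i+1 and x[0]==j+1:
--                     m = min(m,dp[j]+x[2])
--         dp[i] = m
--
--     return dp[-1]
-- ===== SOURCE B (Python) =====
-- def computerNetwork(n, network):
--     if n == 1:
--         return 0
--     # Cost to reach node v directly from node 1: weight of the LAST listed
--     # edge {1, v} (dict overwrite); also collect the low->high edges inside 1..n.
--     direct = {}
--     edges = []
--     for e in network:
--         a, b, w = e[0], e[1], e[2]
--         lo, hi = (a, b) if a <= b else (b, a)
--         if lo == 1 and hi <= n: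
--             direct[hi] = w
--         if 1 <= lo < hi <= n:
--             edges.append((lo, hi, w))
--     dp = [direct.get(v, 100000) for v in range(1, n + 1)]
--     # Every edge goes from a lower to a higher node, so scanning the edges by
--     # ascending source relaxes them in topological order: one pass suffices.
--     edges.sort(key=lambda t: t[0])
--     for lo, hi, w in edges:
--         if dp[lo - 1] + w < dp[hi - 1]:
--             dp[hi - 1] = dp[lo - 1] + w
--     return dp[n - 1]
-- ===== Notes on version B (the rewrite author's own statement) =====
-- stated objective: faster
-- what changed: B drops A's normalize-then-sort-by-(lo,hi) step and its pull-style DP that rescans the entire edge list for every vertex pair (j,i); instead it builds in one pass a dict of direct node-1 edges plus the in-range low->high edge list, sorts the edges once by their lower endpoint, and relaxes each edge exactly once in that topological order.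
import Mathlib
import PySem

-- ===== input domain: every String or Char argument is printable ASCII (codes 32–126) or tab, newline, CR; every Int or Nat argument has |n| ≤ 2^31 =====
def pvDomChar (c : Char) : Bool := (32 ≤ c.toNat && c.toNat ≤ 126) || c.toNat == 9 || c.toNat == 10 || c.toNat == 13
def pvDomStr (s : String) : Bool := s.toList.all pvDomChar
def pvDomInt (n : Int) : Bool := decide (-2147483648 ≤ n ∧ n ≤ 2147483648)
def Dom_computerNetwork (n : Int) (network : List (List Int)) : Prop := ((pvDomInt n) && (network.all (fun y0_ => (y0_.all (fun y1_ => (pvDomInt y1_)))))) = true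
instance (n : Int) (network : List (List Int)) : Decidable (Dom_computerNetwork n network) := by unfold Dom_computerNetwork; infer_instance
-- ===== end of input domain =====

-- B replaces A's normalize/sort/rescan vertex-pair DP (which rescans the whole edge list for
-- every (j,i) pair) by a single topological-order relaxation pass over the edges sorted by
-- their lower endpoint: objective = faster (asymptotic).

-- ===== PORT A =====
def computerNetwork (n : Int) (network : List (List Int)) : Int :=
  if n == 1 then 0
  else
    -- dp = [100000 for col in range(n)]
    let dp : List Int := (PySem.List.pyRange 0 n 1).map (fun _ => (100000 : Int))
    let dummy := network
    -- for i in range(len(dummy)): temp = sorted(dummy[i][:2]); network.append([temp[0], temp[1], dummy[i][2]])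
    let network2 : List (List Int) :=
      (PySem.List.pyRange 0 (dummy.length : Int) 1).foldl (fun acc i =>
        let temp := PySem.List.sorted (PySem.List.slice (PySem.List.pyGetD dummy i []) none (some 2)) (fun x => x) false
        acc ++ [[PySem.List.pyGetD temp 0 0, PySem.List.pyGetD temp 1 0,
                 PySem.List.pyGetD (PySem.List.pyGetD dummy i []) 2 0]]) []
    -- network = sorted(network, key=lambda x: (x[0], x[1]))
    let network3 := PySem.List.sorted2 network2
        (fun x => PySem.List.pyGetD x 0 0) (fun x => PySem.List.pyGetD x 1 0) false
    -- first dp-filling loop; i comes from range(n), so 0 ≤ i and dp[i] = x[2] is dp.set i.toNat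
    let dp := (PySem.List.pyRange 0 n 1).foldl (fun dp i =>
        network3.foldl (fun dp x =>
          if PySem.List.pyGetD x 1 0 == i + 1 && PySem.List.pyGetD x 0 0 == 1 then
            dp.set i.toNat (PySem.List.pyGetD x 2 0)
          else dp) dp) dp
    -- relaxation loop
    let dp := (PySem.List.pyRange 0 n 1).foldl (fun dp i =>
        let m := (PySem.List.pyRange 0 i 1).foldl (fun m j =>
            network3.foldl (fun m x =>
              if PySem.List.pyGetD x 1 0 == i + 1 && PySem.List.pyGetD x 0 0 == j + 1 then
                min m (PySem.List.pyGetD dp j 0 + PySem.List.pyGetD x 2 0)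
              else m) m) (PySem.List.pyGetD dp i 0)
        dp.set i.toNat m) dp
    (PySem.List.pyGet? dp (-1)).getD 0

-- ===== PORT B =====
def computerNetwork_alt (n : Int) (network : List (List Int)) : Int :=
  if n == 1 then 0
  else
    -- one loop over the input rows, two independent accumulators (a dict and an edge list)
    let p := network.foldl (fun (p : PySem.Dict Int Int × List (Int × Int × Int)) e =>
      let a := PySem.List.pyGetD e 0 0
      let b := PySem.List.pyGetD e 1 0
      let w := PySem.List.pyGetD e 2 0
      let lo := if a ≤ b then a else b
      let hi := if a ≤ b then b else a
      ((if lo == 1 && hi ≤ n then p.1.insert hi w else p.1),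
       (if 1 ≤ lo && lo < hi && hi ≤ n then p.2 ++ [(lo, hi, w)] else p.2)))
      (PySem.Dict.empty, [])
    -- dp = [direct.get(v, 100000) for v in range(1, n + 1)]
    let dp := (PySem.List.pyRange 1 (n + 1) 1).map (fun v => p.1.getD v 100000)
    -- edges.sort(key=lambda t: t[0]); one relaxation per edge, in ascending-source order
    let edges := PySem.List.sorted p.2 (fun t => t.1) false
    let dp := edges.foldl (fun dp t =>
      if PySem.List.pyGetD dp (t.1 - 1) 0 + t.2.2 < PySem.List.pyGetD dp (t.2.1 - 1) 0 then
        dp.set (t.2.1 - 1).toNat (PySem.List.pyGetD dp (t.1 - 1) 0 + t.2.2)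
      else dp) dp
    PySem.List.pyGetD dp (n - 1) 0

-- ===== PRECONDITION & SPEC =====
-- Pre_ excludes exactly the inputs on which the Python A raises IndexError: n < 1 (dp[-1] on an
-- empty dp) and, unless n == 1 returns early, an edge row with fewer than 3 entries.
def Pre_computerNetwork (n : Int) (network : List (List Int)) : Prop :=
  1 ≤ n ∧ (n = 1 ∨ ∀ e ∈ network, 3 ≤ e.length)
instance (n : Int) (network : List (List Int)) : Decidable (Pre_computerNetwork n network) := by
  unfold Pre_computerNetwork; infer_instance

def pvWitness_computerNetwork : Int × List (List Int) := (3, [[1, 2, 5], [2, 3, 1], [3, 1, 9]])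

def Spec_computerNetwork (n : Int) (network : List (List Int)) (out : Int) : Prop := out = computerNetwork_alt n network
instance (n : Int) (network : List (List Int)) (out : Int) : Decidable (Spec_computerNetwork n network out) := by unfold Spec_computerNetwork; infer_instance

-- ===== CLAIM (what is proved, stated in full; the proofs are below) =====
def Claim_equal_computerNetwork : Prop := ∀ (n : Int) (network : List (List Int)), Dom_computerNetwork n network → Pre_computerNetwork n network → Spec_computerNetwork n network (computerNetwork n network)

-- ===== LEMMAS AND PROOFS =====

-- normalized edge of a row: (low endpoint, high endpoint, weight)
def pvTrip (e : List Int) : Int × Int × Int :=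
  (min (PySem.List.pyGetD e 0 0) (PySem.List.pyGetD e 1 0),
   max (PySem.List.pyGetD e 0 0) (PySem.List.pyGetD e 1 0),
   PySem.List.pyGetD e 2 0)

def pvRow (t : Int × Int × Int) : List Int := [t.1, t.2.1, t.2.2]

-- weights, in list order, of normalized edges from a to b
def pvW (trips : List (Int × Int × Int)) (a b : Int) : List Int :=
  (trips.filter (fun t => t.1 == a && t.2.1 == b)).map (fun t => t.2.2)

def pvBase (trips : List (Int × Int × Int)) (i : Nat) : Int :=
  (pvW trips 1 ((i : Int) + 1)).getLastD 100000

-- the value both programs compute for node i+1 (0-indexed i)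
def pvCost (trips : List (Int × Int × Int)) (i : Nat) : Int :=
  (List.range i).attach.foldl
    (fun m j => (pvW trips ((j.1 : Int) + 1) ((i : Int) + 1)).foldl
        (fun m w => min m (pvCost trips j.1 + w)) m)
    (pvBase trips i)
termination_by i
decreasing_by exact List.mem_range.mp j.2

-- ---- small facts about A's normalization ----

theorem pvSortedPair (a b : Int) :
    PySem.List.sorted [a, b] (fun x => x) false = [min a b, max a b] := by
  rcases le_or_gt a b with h | h
  · simp [PySem.List.sorted, PySem.List.insertBy, not_lt.mpr h, min_eq_left h, max_eq_right h]
  · simp [PySem.List.sorted, PySem.List.insertBy, h, min_eq_right h.le, max_eq_left h.le]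

theorem pvSliceTwo (e : List Int) (h : 3 ≤ e.length) :
    PySem.List.slice e none (some 2) = [PySem.List.pyGetD e 0 0, PySem.List.pyGetD e 1 0] := by
  rcases e with _ | ⟨x, _ | ⟨y, t⟩⟩
  · simp at h
  · simp at h
  · rw [PySem.List.slice_to _ (by norm_num)]
    simp [PySem.List.pyGetD_ofNat']

theorem pvFoldRangeMap (L : List (List Int)) (g : List Int → List Int) :
    (PySem.List.pyRange 0 (L.length : Int) 1).foldl
      (fun acc i => acc ++ [g (PySem.List.pyGetD L i [])]) []
      = L.map g := by
  rw [show ((L.length : Nat) : Int) = ((L.length : Nat) : Int) from rfl,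
      PySem.List.pyRange_zero_natCast, List.foldl_map]
  simp only [PySem.List.pyGetD_natCast]
  rw [PySem.List.foldl_append_singleton_eq_map]
  apply List.ext_getElem (by simp)
  intro i h1 h2
  simp only [List.getElem_map, List.getElem_range, List.nil_append]
  rw [List.getD_eq_getElem _ _ (by simpa using h2)]

theorem pvNormA (network : List (List Int)) (hLen : ∀ e ∈ network, 3 ≤ e.length) :
    (PySem.List.pyRange 0 (network.length : Int) 1).foldl (fun acc i =>
        let temp := PySem.List.sorted (PySem.List.slice (PySem.List.pyGetD network i []) none (some 2)) (fun x => x) false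
        acc ++ [[PySem.List.pyGetD temp 0 0, PySem.List.pyGetD temp 1 0,
                 PySem.List.pyGetD (PySem.List.pyGetD network i []) 2 0]]) []
      = (network.map pvTrip).map pvRow := by
  have := pvFoldRangeMap network (fun e =>
    [PySem.List.pyGetD (PySem.List.sorted (PySem.List.slice e none (some 2)) (fun x => x) false) 0 0,
     PySem.List.pyGetD (PySem.List.sorted (PySem.List.slice e none (some 2)) (fun x => x) false) 1 0,
     PySem.List.pyGetD e 2 0])
  rw [this, List.map_map]
  apply List.map_congr_left
  intro e he
  rw [pvSliceTwo e (hLen e he), pvSortedPair]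
  simp [PySem.List.pyGetD_ofNat', pvRow, pvTrip]

-- ---- stability of A's sort under a both-keys-fixed filter ----

def pvBef {α : Type} (k1 k2 : α → Int) (a b : α) : Bool :=
  decide (k1 a < k1 b) || !decide (k1 b < k1 a) && decide (k2 a < k2 b)

theorem pvBef_iff {α : Type} (k1 k2 : α → Int) (a b : α) :
    pvBef k1 k2 a b = true ↔ (k1 a < k1 b ∨ (k1 a = k1 b ∧ k2 a < k2 b)) := by
  simp [pvBef]; omega

theorem pvBef_false_iff {α : Type} (k1 k2 : α → Int) (a b : α) :
    pvBef k1 k2 a b = false ↔ ¬ (k1 a < k1 b ∨ (k1 a = k1 b ∧ k2 a < k2 b)) := by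
  simp [pvBef]; omega

theorem pvSorted2_eq {α : Type} (k1 k2 : α → Int) (xs : List α) :
    PySem.List.sorted2 xs k1 k2 false
      = xs.foldl (fun acc x => PySem.List.insertBy (pvBef k1 k2) x acc) [] := rfl

theorem pvIns_pairwise {α : Type} (k1 k2 : α → Int) (x : α) (ys : List α)
    (h : ys.Pairwise (fun a b => pvBef k1 k2 b a = false)) :
    (PySem.List.insertBy (pvBef k1 k2) x ys).Pairwise (fun a b => pvBef k1 k2 b a = false) := by
  induction ys with
  | nil => simp [PySem.List.insertBy]
  | cons y ys ih =>
    rw [List.pairwise_cons] at h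
    obtain ⟨hy, hys⟩ := h
    rw [PySem.List.insertBy]
    by_cases hxy : pvBef k1 k2 x y = true
    · rw [if_pos hxy]
      refine List.Pairwise.cons ?_ (List.Pairwise.cons hy hys)
      intro z hz
      have h2 := (pvBef_iff k1 k2 x y).mp hxy
      rcases List.mem_cons.mp hz with rfl | hz
      · rw [pvBef_false_iff]; omega
      · have h1 := hy z hz
        rw [pvBef_false_iff] at h1 ⊢
        omega
    · rw [if_neg hxy]
      refine List.Pairwise.cons ?_ (ih hys)
      intro z hz
      rcases (PySem.List.mem_insertBy _ _ _ _).mp hz with rfl | hz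
      · exact Bool.eq_false_iff.mpr hxy
      · exact hy z hz

theorem pvIns_filter_neg {α : Type} (bef : α → α → Bool) (p : α → Bool)
    (x : α) (hx : p x = false) (ys : List α) :
    (PySem.List.insertBy bef x ys).filter p = ys.filter p := by
  induction ys with
  | nil => simp [PySem.List.insertBy, hx]
  | cons y ys ih =>
    rw [PySem.List.insertBy]
    by_cases hxy : bef x y = true
    · rw [if_pos hxy]
      simp [List.filter_cons, hx]
    · rw [if_neg hxy]
      simp only [List.filter_cons]
      rw [ih]

theorem pvIns_filter_pos {α : Type} (k1 k2 : α → Int) (p : α → Bool) (c1 c2 : Int)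
    (hp : ∀ y, p y = true → k1 y = c1 ∧ k2 y = c2) (x : α) (hx : p x = true) (ys : List α)
    (h : ys.Pairwise (fun a b => pvBef k1 k2 b a = false)) :
    (PySem.List.insertBy (pvBef k1 k2) x ys).filter p = ys.filter p ++ [x] := by
  induction ys with
  | nil => simp [PySem.List.insertBy, hx]
  | cons y ys ih =>
    rw [List.pairwise_cons] at h
    obtain ⟨hy, hys⟩ := h
    rw [PySem.List.insertBy]
    by_cases hxy : pvBef k1 k2 x y = true
    · rw [if_pos hxy]
      have hnil : (y :: ys).filter p = [] := by
        rw [List.filter_eq_nil_iff]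
        intro z hz hpz
        have hzc := hp z hpz
        have hxc := hp x hx
        have h2 := (pvBef_iff k1 k2 x y).mp hxy
        rcases List.mem_cons.mp hz with rfl | hz
        · omega
        · have h1 := hy z hz
          rw [pvBef_false_iff] at h1
          omega
      rw [List.filter_cons_of_pos hx, hnil]
      rfl
    · rw [if_neg hxy]
      simp only [List.filter_cons]
      rw [ih hys]
      by_cases hpy : p y = true <;> simp [hpy]

theorem pvSorted2_filter {α : Type} (k1 k2 : α → Int) (p : α → Bool) (c1 c2 : Int)
    (hp : ∀ y, p y = true → k1 y = c1 ∧ k2 y = c2) (xs : List α) :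
    (PySem.List.sorted2 xs k1 k2 false).filter p = xs.filter p := by
  rw [pvSorted2_eq]
  suffices H : ∀ (xs : List α) (acc : List α),
      acc.Pairwise (fun a b => pvBef k1 k2 b a = false) →
      ((xs.foldl (fun acc x => PySem.List.insertBy (pvBef k1 k2) x acc) acc).filter p
        = acc.filter p ++ xs.filter p) by
    simpa using H xs [] (by simp)
  intro xs
  induction xs with
  | nil => intro acc _; simp
  | cons x xs ih =>
    intro acc hacc
    have hpw := pvIns_pairwise k1 k2 x acc hacc
    rw [List.foldl_cons, ih _ hpw]
    by_cases hpx : p x = true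
    · rw [pvIns_filter_pos k1 k2 p c1 c2 hp x hpx acc hacc]
      simp [List.filter_cons, hpx]
    · rw [pvIns_filter_neg _ p x (Bool.eq_false_iff.mpr hpx) acc]
      simp [List.filter_cons, hpx]

-- ---- dp lists as maps over List.range ----

theorem pvSetMapRange (f : Nat → Int) (N i : Nat) (hi : i < N) (v : Int) :
    ((List.range N).map f).set i v
      = (List.range N).map (fun j => if j = i then v else f j) := by
  apply List.ext_getElem (by simp)
  intro j h1 h2
  simp only [List.getElem_set, List.getElem_map, List.getElem_range]
  by_cases hj : j = i
  · simp [hj]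
  · simp [hj, Ne.symm hj]

theorem pvFoldlSetMapRange (f : Nat → Int) (N i : Nat) (hi : i < N) (ws : List Int) :
    ws.foldl (fun dp w => dp.set i w) ((List.range N).map f)
      = (List.range N).map (fun j => if j = i then ws.getLastD (f i) else f j) := by
  induction ws generalizing f with
  | nil =>
    simp only [List.foldl_nil, List.getLastD_nil]
    apply List.map_congr_left
    intro j _
    by_cases hj : j = i <;> simp [hj]
  | cons w ws ih =>
    rw [List.foldl_cons, pvSetMapRange f N i hi w, ih (fun j => if j = i then w else f j)]
    apply List.map_congr_left
    intro j _
    by_cases hj : j = i <;> simp [hj, List.getLast?_cons, List.getLastD_eq_getLast?]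

theorem pvGetMapRange (f : Nat → Int) (N j : Nat) (hj : j < N) :
    PySem.List.pyGetD ((List.range N).map f) (j : Int) 0 = f j := by
  rw [PySem.List.pyGetD_natCast]
  exact PySem.List.getD_map_range f N j 0 hj

theorem pvLastMapRange (f : Nat → Int) (N : Nat) (h : 1 ≤ N) :
    (PySem.List.pyGet? ((List.range N).map f) (-1)).getD 0 = f (N - 1) := by
  have hidx : PySem.List.pyIdx? ((List.range N).map f).length (-1) = some (N - 1) := by
    simp only [PySem.List.pyIdx?, List.length_map, List.length_range]
    rw [if_neg (by norm_num), if_pos (by omega)]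
    norm_num
  rw [PySem.List.pyGet?, hidx]
  have hlt : N - 1 < N := by omega
  simp [List.getElem?_map, List.getElem?_range hlt]

theorem pvRange0 (n : Int) (h : 0 ≤ n) :
    PySem.List.pyRange 0 n 1 = (List.range n.toNat).map (fun (k : Nat) => (k : Int)) := by
  rw [show n = ((n.toNat : Nat) : Int) from (Int.toNat_of_nonneg h).symm,
      PySem.List.pyRange_zero_natCast]
  rw [Int.toNat_natCast]

theorem pvRange1 (n : Int) (h : 0 < n) :
    PySem.List.pyRange 1 (n + 1) 1 = (List.range n.toNat).map (fun (k : Nat) => (k : Int) + 1) := by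
  have h1 : ((1:Int) < n + 1) := by omega
  simp only [PySem.List.pyRange, if_neg (by norm_num : ¬ (1:Int) = 0), if_pos (by norm_num : (0:Int) < 1), if_pos h1]
  have hc : ((n + 1 - 1 + 1 - 1) / 1 : Int).toNat = n.toNat := by
    simp
  rw [hc]
  apply List.map_congr_left
  intro k _
  ring

-- ---- A evaluated ----

-- row projections of a normalized row
theorem pvRowGet0 (t : Int × Int × Int) : PySem.List.pyGetD (pvRow t) 0 0 = t.1 := by
  simp [pvRow, PySem.List.pyGetD_ofNat']
theorem pvRowGet1 (t : Int × Int × Int) : PySem.List.pyGetD (pvRow t) 1 0 = t.2.1 := by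
  simp [pvRow, PySem.List.pyGetD_ofNat']
theorem pvRowGet2 (t : Int × Int × Int) : PySem.List.pyGetD (pvRow t) 2 0 = t.2.2 := by
  simp [pvRow, PySem.List.pyGetD_ofNat']

-- any scan of A's sorted edge list that keeps the rows with fixed endpoints (a, b)
-- is a fold over the weight list pvW trips a b
theorem pvScanToW {δ : Type} (trips : List (Int × Int × Int)) (a b : Int)
    (f : δ → Int → δ) (init : δ) :
    (PySem.List.sorted2 (trips.map pvRow)
        (fun x => PySem.List.pyGetD x 0 0) (fun x => PySem.List.pyGetD x 1 0) false).foldl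
      (fun d x => if PySem.List.pyGetD x 1 0 == b && PySem.List.pyGetD x 0 0 == a
        then f d (PySem.List.pyGetD x 2 0) else d) init
      = (pvW trips a b).foldl f init := by
  rw [PySem.List.foldl_if_eq_foldl_filter,
      pvSorted2_filter (fun x => PySem.List.pyGetD x 0 0) (fun x => PySem.List.pyGetD x 1 0)
        _ a b (fun y hy => by
          simp only [Bool.and_eq_true, beq_iff_eq] at hy
          exact ⟨hy.2, hy.1⟩),
      List.filter_map, List.foldl_map]
  have hfilt : trips.filter ((fun x => PySem.List.pyGetD x 1 0 == b && PySem.List.pyGetD x 0 0 == a) ∘ pvRow)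
      = trips.filter (fun t => t.1 == a && t.2.1 == b) := by
    apply List.filter_congr
    intro t _
    simp only [Function.comp_apply, pvRowGet0, pvRowGet1]
    exact Bool.and_comm _ _
  rw [hfilt]
  unfold pvW
  rw [List.foldl_map]
  apply PySem.List.foldl_congr_mem'
  intro t _ d
  rw [pvRowGet2]

theorem pvInitA (trips : List (Int × Int × Int)) (N : Nat) :
    ((List.range N).map (fun (k : Nat) => (k : Int))).foldl
      (fun dp i => (PySem.List.sorted2 (trips.map pvRow)
          (fun x => PySem.List.pyGetD x 0 0) (fun x => PySem.List.pyGetD x 1 0) false).foldl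
        (fun dp x => if PySem.List.pyGetD x 1 0 == i + 1 && PySem.List.pyGetD x 0 0 == 1
          then dp.set i.toNat (PySem.List.pyGetD x 2 0) else dp) dp)
      ((List.range N).map (fun _ => (100000 : Int)))
      = (List.range N).map (pvBase trips) := by
  have H : ∀ K : Nat, K ≤ N →
      ((List.range K).map (fun (k : Nat) => (k : Int))).foldl
        (fun dp i => (PySem.List.sorted2 (trips.map pvRow)
            (fun x => PySem.List.pyGetD x 0 0) (fun x => PySem.List.pyGetD x 1 0) false).foldl
          (fun dp x => if PySem.List.pyGetD x 1 0 == i + 1 && PySem.List.pyGetD x 0 0 == 1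
            then dp.set i.toNat (PySem.List.pyGetD x 2 0) else dp) dp)
        ((List.range N).map (fun _ => (100000 : Int)))
        = (List.range N).map (fun j => if j < K then pvBase trips j else (100000 : Int)) := by
    intro K
    induction K with
    | zero => intro _; simp
    | succ K ih =>
      intro hK
      rw [List.range_succ, List.map_append, List.foldl_append, ih (by omega)]
      simp only [List.map_cons, List.map_nil, List.foldl_cons, List.foldl_nil, Int.toNat_natCast]
      refine Eq.trans (pvScanToW trips 1 ((K : Int) + 1)
        (fun (dp : List Int) (w : Int) => dp.set K w) _) ?_
      rw [pvFoldlSetMapRange _ N K (by omega)]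
      apply List.map_congr_left
      intro j _
      by_cases hjK : j = K
      · subst hjK
        simp [pvBase, List.getLastD_eq_getLast?]
      · by_cases hjlt : j < K <;> simp [hjK, hjlt] <;> omega
  rw [H N le_rfl]
  apply List.map_congr_left
  intro j hj
  rw [if_pos (List.mem_range.mp hj)]

theorem pvRelaxA (trips : List (Int × Int × Int)) (N : Nat) :
    ((List.range N).map (fun (k : Nat) => (k : Int))).foldl
      (fun dp i => dp.set i.toNat
        ((PySem.List.pyRange 0 i 1).foldl (fun m j =>
            (PySem.List.sorted2 (trips.map pvRow)
              (fun x => PySem.List.pyGetD x 0 0) (fun x => PySem.List.pyGetD x 1 0) false).foldl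
              (fun m x =>
                if PySem.List.pyGetD x 1 0 == i + 1 && PySem.List.pyGetD x 0 0 == j + 1 then
                  min m (PySem.List.pyGetD dp j 0 + PySem.List.pyGetD x 2 0)
                else m) m) (PySem.List.pyGetD dp i 0)))
      ((List.range N).map (pvBase trips))
      = (List.range N).map (pvCost trips) := by
  have H : ∀ K : Nat, K ≤ N →
      ((List.range K).map (fun (k : Nat) => (k : Int))).foldl
        (fun dp i => dp.set i.toNat
          ((PySem.List.pyRange 0 i 1).foldl (fun m j =>
              (PySem.List.sorted2 (trips.map pvRow)
                (fun x => PySem.List.pyGetD x 0 0) (fun x => PySem.List.pyGetD x 1 0) false).foldl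
                (fun m x =>
                  if PySem.List.pyGetD x 1 0 == i + 1 && PySem.List.pyGetD x 0 0 == j + 1 then
                    min m (PySem.List.pyGetD dp j 0 + PySem.List.pyGetD x 2 0)
                  else m) m) (PySem.List.pyGetD dp i 0)))
        ((List.range N).map (pvBase trips))
        = (List.range N).map (fun j => if j < K then pvCost trips j else pvBase trips j) := by
    intro K
    induction K with
    | zero =>
      intro _
      exact (List.map_congr_left (fun j _ => by simp)).symm
    | succ K ih =>
      intro hK
      rw [List.range_succ, List.map_append, List.foldl_append, ih (by omega)]
      simp only [List.map_cons, List.map_nil, List.foldl_cons, List.foldl_nil, Int.toNat_natCast]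
      have hm : (PySem.List.pyRange 0 ((K : Nat) : Int) 1).foldl (fun m j =>
              (PySem.List.sorted2 (trips.map pvRow)
                (fun x => PySem.List.pyGetD x 0 0) (fun x => PySem.List.pyGetD x 1 0) false).foldl
                (fun m x =>
                  if PySem.List.pyGetD x 1 0 == ((K : Nat) : Int) + 1 && PySem.List.pyGetD x 0 0 == j + 1 then
                    min m (PySem.List.pyGetD ((List.range N).map (fun j => if j < K then pvCost trips j else pvBase trips j)) j 0 + PySem.List.pyGetD x 2 0)
                  else m) m)
            (PySem.List.pyGetD ((List.range N).map (fun j => if j < K then pvCost trips j else pvBase trips j)) ((K : Nat) : Int) 0)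
          = pvCost trips K := by
        rw [pvGetMapRange (fun j => if j < K then pvCost trips j else pvBase trips j) N K (by omega),
            if_neg (lt_irrefl K)]
        rw [pvRange0 _ (by positivity), Int.toNat_natCast, List.foldl_map]
        rw [pvCost]
        refine Eq.trans ?_ (List.foldl_attach (l := List.range K)
          (f := fun m (j : Nat) => List.foldl (fun m w => min m (pvCost trips j + w)) m
            (pvW trips ((j : Int) + 1) ((K : Int) + 1)))
          (b := pvBase trips K)).symm
        apply PySem.List.foldl_congr_mem'
        intro k hk m
        have hk' := List.mem_range.mp hk
        refine Eq.trans (pvScanToW trips ((k : Int) + 1) ((K : Int) + 1)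
          (fun (m : Int) (w : Int) => min m (PySem.List.pyGetD ((List.range N).map (fun j => if j < K then pvCost trips j else pvBase trips j)) (k : Int) 0 + w)) m) ?_
        rw [pvGetMapRange _ N k (by omega), if_pos hk']
      rw [hm, pvSetMapRange _ N K (by omega)]
      apply List.map_congr_left
      intro j _
      by_cases hjK : j = K
      · subst hjK
        simp
      · by_cases hjlt : j < K <;> simp [hjK, hjlt] <;> omega
  rw [H N le_rfl]
  apply List.map_congr_left
  intro j hj
  rw [if_pos (List.mem_range.mp hj)]

theorem pvAeval (n : Int) (network : List (List Int)) (h2 : 2 ≤ n)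
    (hLen : ∀ e ∈ network, 3 ≤ e.length) :
    computerNetwork n network = pvCost (network.map pvTrip) (n.toNat - 1) := by
  have hne : (n == 1) = false := by simp; omega
  simp only [computerNetwork, hne, Bool.false_eq_true, if_false]
  rw [pvNormA network hLen, pvRange0 n (by omega)]
  rw [show ((List.range n.toNat).map (fun (k : Nat) => (k : Int))).map (fun _ => (100000 : Int))
        = (List.range n.toNat).map (fun (_ : Nat) => (100000 : Int)) from by rw [List.map_map]; rfl]
  rw [pvInitA (network.map pvTrip) n.toNat, pvRelaxA (network.map pvTrip) n.toNat,
      pvLastMapRange _ _ (by omega)]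

-- ---- B evaluated ----

def pvCondN (n : Int) (t : Int × Int × Int) : Bool := 1 ≤ t.1 && t.1 < t.2.1 && t.2.1 ≤ n

def pvSB (n : Int) (trips : List (Int × Int × Int)) : List (Int × Int × Int) :=
  PySem.List.sorted (trips.filter (pvCondN n)) (fun t => t.1) false

-- dp value at index i after relaxing the edges of P (sources priced by pvCost)
def pvValP (trips P : List (Int × Int × Int)) (i : Nat) : Int :=
  (P.filter (fun t => t.2.1 == (i : Int) + 1)).foldl
    (fun v t => min v (pvCost trips (t.1 - 1).toNat + t.2.2)) (pvBase trips i)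

theorem pvDirectGet (n : Int) (ts : List (Int × Int × Int)) (d : PySem.Dict Int Int)
    (v : Int) (h1 : 1 ≤ v) (h2 : v ≤ n) :
    (ts.foldl (fun d t => if t.1 == 1 && t.2.1 ≤ n then d.insert t.2.1 t.2.2 else d) d).get? v
      = (pvW ts 1 v).getLast?.or (d.get? v) := by
  induction ts generalizing d with
  | nil => simp [pvW]
  | cons t ts ih =>
    rw [List.foldl_cons, ih _]
    have hcons : pvW (t :: ts) 1 v
        = (if t.1 == 1 && t.2.1 == v then [t.2.2] else []) ++ pvW ts 1 v := by
      unfold pvW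
      rw [List.filter_cons]
      by_cases hc : (t.1 == 1 && t.2.1 == v) = true <;> simp [hc]
    rw [hcons, List.getLast?_append, Option.or_assoc]
    congr 1
    by_cases hm : t.2.1 = v
    · by_cases hone : t.1 = 1
      · have : (t.1 == 1 && decide (t.2.1 ≤ n)) = true := by simp [hone, hm]; omega
        rw [if_pos this, hm, PySem.Dict.get?_insert_self]
        simp [hone]
      · have h1 : (t.1 == 1 && decide (t.2.1 ≤ n)) = false := by simp [hone]
        have h2 : (t.1 == 1 && t.2.1 == v) = false := by simp [hone]
        simp [h1, h2]
    · have h2 : (t.1 == 1 && t.2.1 == v) = false := by simp [hm]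
      rw [h2]
      by_cases hc : (t.1 == 1 && decide (t.2.1 ≤ n)) = true
      · rw [if_pos hc, PySem.Dict.get?_insert, if_neg (fun h => hm h.symm)]
        simp
      · simp [hc]

-- grouping the edges with target b by their source is a permutation
theorem pvGroupPerm (L : List (Int × Int × Int)) (b : Int) (k : Nat) :
    (List.flatMap (fun (j : Nat) => L.filter (fun t => t.1 == (j : Int) + 1 && t.2.1 == b)) (List.range k)).Perm
      (L.filter (fun t => (1 ≤ t.1 && t.1 ≤ (k : Int)) && t.2.1 == b)) := by
  induction k with
  | zero =>
    have hnil : L.filter (fun t => (1 ≤ t.1 && t.1 ≤ ((0 : Nat) : Int)) && t.2.1 == b) = [] := by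
      rw [List.filter_eq_nil_iff]
      intro t _ h
      simp only [Bool.and_eq_true, decide_eq_true_eq] at h
      omega
    rw [List.range_zero, List.flatMap_nil, hnil]
  | succ k ih =>
    rw [List.range_succ, List.flatMap_append]
    have hgrp : List.flatMap (fun (j : Nat) => L.filter (fun t => t.1 == (j : Int) + 1 && t.2.1 == b)) [k]
        = L.filter (fun t => t.1 == (k : Int) + 1 && t.2.1 == b) := by
      simp
    rw [hgrp]
    refine (ih.append_right _).trans ?_
    have hsplit := List.filter_append_perm (fun t => decide (t.1 ≤ (k : Int)))
      (L.filter (fun t => (1 ≤ t.1 && t.1 ≤ ((k + 1 : Nat) : Int)) && t.2.1 == b))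
    rw [List.filter_filter, List.filter_filter] at hsplit
    have e1 : L.filter (fun a => decide (a.1 ≤ (k : Int)) && ((1 ≤ a.1 && a.1 ≤ ((k + 1 : Nat) : Int)) && a.2.1 == b))
        = L.filter (fun t => (1 ≤ t.1 && t.1 ≤ (k : Int)) && t.2.1 == b) := by
      apply List.filter_congr
      intro t _
      rw [Bool.eq_iff_iff]
      simp
      constructor
      · rintro ⟨h1, h2, h3⟩; exact ⟨⟨h2.1, h1⟩, h3⟩
      · rintro ⟨⟨h1, h2⟩, h3⟩; refine ⟨h2, ⟨h1, by omega⟩, h3⟩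
    have e2 : L.filter (fun a => !decide (a.1 ≤ (k : Int)) && ((1 ≤ a.1 && a.1 ≤ ((k + 1 : Nat) : Int)) && a.2.1 == b))
        = L.filter (fun t => t.1 == (k : Int) + 1 && t.2.1 == b) := by
      apply List.filter_congr
      intro t _
      rw [Bool.eq_iff_iff]
      simp
      constructor
      · rintro ⟨h1, h2, h3⟩; omega
      · rintro ⟨h1, h3⟩; omega
    rw [e1, e2] at hsplit
    exact hsplit

-- after relaxing ALL edges, index i holds pvCost i
theorem pvPushAll (n : Int) (trips : List (Int × Int × Int)) (i : Nat)
    (hi : (i : Int) + 1 ≤ n) :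
    pvValP trips (pvSB n trips) i = pvCost trips i := by
  haveI : RightCommutative (fun (v : Int) (t : Int × Int × Int) =>
      min v (pvCost trips (t.1 - 1).toNat + t.2.2)) := ⟨fun b a1 a2 => min_right_comm _ _ _⟩
  have hR : pvCost trips i
      = (List.flatMap (fun (j : Nat) =>
          trips.filter (fun t => t.1 == (j : Int) + 1 && t.2.1 == (i : Int) + 1)) (List.range i)).foldl
        (fun v t => min v (pvCost trips (t.1 - 1).toNat + t.2.2)) (pvBase trips i) := by
    rw [pvCost, List.foldl_flatMap]
    refine Eq.trans (List.foldl_attach (l := List.range i)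
      (f := fun m (j : Nat) => List.foldl (fun m w => min m (pvCost trips j + w)) m
        (pvW trips ((j : Int) + 1) ((i : Int) + 1)))
      (b := pvBase trips i)) ?_
    apply PySem.List.foldl_congr_mem'
    intro j hj m
    unfold pvW
    rw [List.foldl_map]
    apply PySem.List.foldl_congr_mem'
    intro t ht acc
    have h1 := (List.mem_filter.mp ht).2
    simp only [Bool.and_eq_true, beq_iff_eq] at h1
    have : (t.1 - 1).toNat = j := by omega
    rw [this]
  refine Eq.trans ?_ hR.symm
  unfold pvValP pvSB
  have p1 : ((PySem.List.sorted (trips.filter (pvCondN n)) (fun t => t.1) false).filter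
        (fun t => t.2.1 == (i : Int) + 1)).Perm
      ((trips.filter (pvCondN n)).filter (fun t => t.2.1 == (i : Int) + 1)) :=
    List.Perm.filter _ (PySem.List.sorted_perm _ _ _)
  have e3 : (trips.filter (pvCondN n)).filter (fun t => t.2.1 == (i : Int) + 1)
      = trips.filter (fun t => (1 ≤ t.1 && t.1 ≤ (i : Int)) && t.2.1 == (i : Int) + 1) := by
    rw [List.filter_filter]
    apply List.filter_congr
    intro t _
    rw [Bool.eq_iff_iff]
    simp [pvCondN]
    omega
  rw [e3] at p1
  exact (p1.trans (pvGroupPerm trips ((i : Int) + 1) i).symm).foldl_eq _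

theorem pvPushLoop (n : Int) (trips : List (Int × Int × Int)) (N : Nat)
    (hN : (N : Int) = n) (h2 : 2 ≤ n) :
    ∀ (R P : List (Int × Int × Int)), pvSB n trips = P ++ R →
    R.foldl (fun dp t =>
        if PySem.List.pyGetD dp (t.1 - 1) 0 + t.2.2 < PySem.List.pyGetD dp (t.2.1 - 1) 0 then
          dp.set (t.2.1 - 1).toNat (PySem.List.pyGetD dp (t.1 - 1) 0 + t.2.2)
        else dp)
      ((List.range N).map (pvValP trips P))
      = (List.range N).map (pvValP trips (pvSB n trips)) := by
  intro R
  induction R with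
  | nil =>
    intro P hP
    rw [List.foldl_nil, hP, List.append_nil]
  | cons t R ih =>
    intro P hP
    have htSB : t ∈ pvSB n trips := by
      rw [hP]; exact List.mem_append_right _ (List.mem_cons_self ..)
    have htEG : t ∈ trips.filter (pvCondN n) := (PySem.List.mem_sorted _ _ _ _).mp htSB
    have hcond := (List.mem_filter.mp htEG).2
    simp only [pvCondN, Bool.and_eq_true, decide_eq_true_eq] at hcond
    obtain ⟨⟨hlo1, hlohi⟩, hhin⟩ := hcond
    have hiN : (t.2.1 - 1).toNat < N := by omega
    have hjN : (t.1 - 1).toNat < N := by omega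
    -- every edge into node t.1 is already in P, so index t.1 - 1 is final
    have hsrc : pvValP trips P ((t.1 - 1).toNat) = pvCost trips ((t.1 - 1).toNat) := by
      have hcast : (((t.1 - 1).toNat : Nat) : Int) + 1 = t.1 := by omega
      have hfilt : P.filter (fun u => u.2.1 == (((t.1 - 1).toNat : Nat) : Int) + 1)
          = (pvSB n trips).filter (fun u => u.2.1 == (((t.1 - 1).toNat : Nat) : Int) + 1) := by
        rw [hP, List.filter_append]
        have hnil : (t :: R).filter (fun u => u.2.1 == (((t.1 - 1).toNat : Nat) : Int) + 1) = [] := by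
          rw [List.filter_eq_nil_iff]
          intro u hu hbeq
          simp only [beq_iff_eq] at hbeq
          rw [hcast] at hbeq
          have huSB : u ∈ pvSB n trips := by rw [hP]; exact List.mem_append_right _ hu
          have huEG := (PySem.List.mem_sorted _ _ _ _).mp huSB
          have hu2 := (List.mem_filter.mp huEG).2
          simp only [pvCondN, Bool.and_eq_true, decide_eq_true_eq] at hu2
          have hpw : (pvSB n trips).Pairwise (fun a b => a.1 ≤ b.1) :=
            PySem.List.sorted_pairwise (trips.filter (pvCondN n)) (fun u => u.1)
          rw [hP] at hpw
          have hta : t.1 ≤ u.1 := by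
            rcases List.mem_cons.mp hu with rfl | huR
            · exact le_refl _
            · exact (List.pairwise_cons.mp (List.pairwise_append.mp hpw).2.1).1 u huR
          omega
        rw [hnil, List.append_nil]
      unfold pvValP
      rw [hfilt]
      exact pvPushAll n trips _ (by omega)
    rw [List.foldl_cons]
    have hcast1 : t.1 - 1 = (((t.1 - 1).toNat : Nat) : Int) := by omega
    have hcast2 : t.2.1 - 1 = (((t.2.1 - 1).toNat : Nat) : Int) := by omega
    have hv1 : PySem.List.pyGetD ((List.range N).map (pvValP trips P)) (t.1 - 1) 0
        = pvCost trips ((t.1 - 1).toNat) := by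
      rw [hcast1, pvGetMapRange _ N _ hjN, hsrc, Int.toNat_natCast]
    have hv2 : PySem.List.pyGetD ((List.range N).map (pvValP trips P)) (t.2.1 - 1) 0
        = pvValP trips P ((t.2.1 - 1).toNat) := by
      rw [hcast2, pvGetMapRange _ N _ hiN, Int.toNat_natCast]
    have hval : ∀ j, pvValP trips (P ++ [t]) j
        = if j = (t.2.1 - 1).toNat
          then min (pvValP trips P j) (pvCost trips ((t.1 - 1).toNat) + t.2.2)
          else pvValP trips P j := by
      intro j
      unfold pvValP
      rw [List.filter_append]
      by_cases hjt : j = (t.2.1 - 1).toNat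
      · subst hjt
        have hkeep : [t].filter (fun u => u.2.1 == (((t.2.1 - 1).toNat : Nat) : Int) + 1) = [t] := by
          have hb : (t.2.1 == (((t.2.1 - 1).toNat : Nat) : Int) + 1) = true := by
            simp only [beq_iff_eq]; omega
          rw [List.filter_singleton, hb, cond_true]
        rw [hkeep, List.foldl_append, List.foldl_cons, List.foldl_nil, if_pos rfl]
      · have hdrop : [t].filter (fun u => u.2.1 == ((j : Nat) : Int) + 1) = [] := by
          rw [List.filter_singleton,
              show (t.2.1 == ((j : Nat) : Int) + 1) = false from by
                simp only [beq_eq_false_iff_ne, ne_eq]; omega,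
              cond_false]
        rw [hdrop, List.append_nil, if_neg hjt]
    have hstep : (if PySem.List.pyGetD ((List.range N).map (pvValP trips P)) (t.1 - 1) 0 + t.2.2
            < PySem.List.pyGetD ((List.range N).map (pvValP trips P)) (t.2.1 - 1) 0 then
          ((List.range N).map (pvValP trips P)).set (t.2.1 - 1).toNat
            (PySem.List.pyGetD ((List.range N).map (pvValP trips P)) (t.1 - 1) 0 + t.2.2)
        else ((List.range N).map (pvValP trips P)))
        = (List.range N).map (pvValP trips (P ++ [t])) := by
      rw [hv1, hv2]
      by_cases hlt : pvCost trips ((t.1 - 1).toNat) + t.2.2 < pvValP trips P ((t.2.1 - 1).toNat)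
      · rw [if_pos hlt, pvSetMapRange _ N _ hiN]
        apply List.map_congr_left
        intro j _
        rw [hval j]
        by_cases hjt : j = (t.2.1 - 1).toNat
        · subst hjt
          rw [if_pos rfl, if_pos rfl]
          exact (min_eq_right hlt.le).symm
        · rw [if_neg hjt, if_neg hjt]
      · rw [if_neg hlt]
        apply List.map_congr_left
        intro j _
        rw [hval j]
        by_cases hjt : j = (t.2.1 - 1).toNat
        · subst hjt
          rw [if_pos rfl, min_eq_left (not_lt.mp hlt)]
        · rw [if_neg hjt]
    rw [hstep]
    exact ih (P ++ [t]) (by rw [hP, List.append_assoc, List.singleton_append])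

theorem pvBeval (n : Int) (network : List (List Int)) (h2 : 2 ≤ n) :
    computerNetwork_alt n network = pvCost (network.map pvTrip) (n.toNat - 1) := by
  have hne : (n == 1) = false := by simp; omega
  have hN : ((n.toNat : Nat) : Int) = n := by omega
  simp only [computerNetwork_alt, hne, Bool.false_eq_true, if_false]
  have hp : network.foldl (fun (p : PySem.Dict Int Int × List (Int × Int × Int)) (e : List Int) =>
        ((if (if PySem.List.pyGetD e 0 0 ≤ PySem.List.pyGetD e 1 0 then PySem.List.pyGetD e 0 0 else PySem.List.pyGetD e 1 0) == 1 && (if PySem.List.pyGetD e 0 0 ≤ PySem.List.pyGetD e 1 0 then PySem.List.pyGetD e 1 0 else PySem.List.pyGetD e 0 0) ≤ n then p.1.insert (if PySem.List.pyGetD e 0 0 ≤ PySem.List.pyGetD e 1 0 then PySem.List.pyGetD e 1 0 else PySem.List.pyGetD e 0 0) (PySem.List.pyGetD e 2 0) else p.1),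
         (if 1 ≤ (if PySem.List.pyGetD e 0 0 ≤ PySem.List.pyGetD e 1 0 then PySem.List.pyGetD e 0 0 else PySem.List.pyGetD e 1 0) && (if PySem.List.pyGetD e 0 0 ≤ PySem.List.pyGetD e 1 0 then PySem.List.pyGetD e 0 0 else PySem.List.pyGetD e 1 0) < (if PySem.List.pyGetD e 0 0 ≤ PySem.List.pyGetD e 1 0 then PySem.List.pyGetD e 1 0 else PySem.List.pyGetD e 0 0) && (if PySem.List.pyGetD e 0 0 ≤ PySem.List.pyGetD e 1 0 then PySem.List.pyGetD e 1 0 else PySem.List.pyGetD e 0 0) ≤ n then p.2 ++ [((if PySem.List.pyGetD e 0 0 ≤ PySem.List.pyGetD e 1 0 then PySem.List.pyGetD e 0 0 else PySem.List.pyGetD e 1 0), (if PySem.List.pyGetD e 0 0 ≤ PySem.List.pyGetD e 1 0 then PySem.List.pyGetD e 1 0 else PySem.List.pyGetD e 0 0), PySem.List.pyGetD e 2 0)] else p.2)))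
        (PySem.Dict.empty, ([] : List (Int × Int × Int)))
      = (network.foldl (fun (d : PySem.Dict Int Int) (e : List Int) =>
      if (if PySem.List.pyGetD e 0 0 ≤ PySem.List.pyGetD e 1 0 then PySem.List.pyGetD e 0 0 else PySem.List.pyGetD e 1 0) == 1 && (if PySem.List.pyGetD e 0 0 ≤ PySem.List.pyGetD e 1 0 then PySem.List.pyGetD e 1 0 else PySem.List.pyGetD e 0 0) ≤ n then d.insert (if PySem.List.pyGetD e 0 0 ≤ PySem.List.pyGetD e 1 0 then PySem.List.pyGetD e 1 0 else PySem.List.pyGetD e 0 0) (PySem.List.pyGetD e 2 0) else d) PySem.Dict.empty,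
         network.foldl (fun (acc : List (Int × Int × Int)) (e : List Int) =>
      if 1 ≤ (if PySem.List.pyGetD e 0 0 ≤ PySem.List.pyGetD e 1 0 then PySem.List.pyGetD e 0 0 else PySem.List.pyGetD e 1 0) && (if PySem.List.pyGetD e 0 0 ≤ PySem.List.pyGetD e 1 0 then PySem.List.pyGetD e 0 0 else PySem.List.pyGetD e 1 0) < (if PySem.List.pyGetD e 0 0 ≤ PySem.List.pyGetD e 1 0 then PySem.List.pyGetD e 1 0 else PySem.List.pyGetD e 0 0) && (if PySem.List.pyGetD e 0 0 ≤ PySem.List.pyGetD e 1 0 then PySem.List.pyGetD e 1 0 else PySem.List.pyGetD e 0 0) ≤ n then acc ++ [((if PySem.List.pyGetD e 0 0 ≤ PySem.List.pyGetD e 1 0 then PySem.List.pyGetD e 0 0 else PySem.List.pyGetD e 1 0), (if PySem.List.pyGetD e 0 0 ≤ PySem.List.pyGetD e 1 0 then PySem.List.pyGetD e 1 0 else PySem.List.pyGetD e 0 0), PySem.List.pyGetD e 2 0)] else acc) ([] : List (Int × Int × Int))) :=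
    PySem.List.foldl_prod_mk (fun (d : PySem.Dict Int Int) (e : List Int) =>
      if (if PySem.List.pyGetD e 0 0 ≤ PySem.List.pyGetD e 1 0 then PySem.List.pyGetD e 0 0 else PySem.List.pyGetD e 1 0) == 1 && (if PySem.List.pyGetD e 0 0 ≤ PySem.List.pyGetD e 1 0 then PySem.List.pyGetD e 1 0 else PySem.List.pyGetD e 0 0) ≤ n then d.insert (if PySem.List.pyGetD e 0 0 ≤ PySem.List.pyGetD e 1 0 then PySem.List.pyGetD e 1 0 else PySem.List.pyGetD e 0 0) (PySem.List.pyGetD e 2 0) else d) (fun (acc : List (Int × Int × Int)) (e : List Int) =>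
      if 1 ≤ (if PySem.List.pyGetD e 0 0 ≤ PySem.List.pyGetD e 1 0 then PySem.List.pyGetD e 0 0 else PySem.List.pyGetD e 1 0) && (if PySem.List.pyGetD e 0 0 ≤ PySem.List.pyGetD e 1 0 then PySem.List.pyGetD e 0 0 else PySem.List.pyGetD e 1 0) < (if PySem.List.pyGetD e 0 0 ≤ PySem.List.pyGetD e 1 0 then PySem.List.pyGetD e 1 0 else PySem.List.pyGetD e 0 0) && (if PySem.List.pyGetD e 0 0 ≤ PySem.List.pyGetD e 1 0 then PySem.List.pyGetD e 1 0 else PySem.List.pyGetD e 0 0) ≤ n then acc ++ [((if PySem.List.pyGetD e 0 0 ≤ PySem.List.pyGetD e 1 0 then PySem.List.pyGetD e 0 0 else PySem.List.pyGetD e 1 0), (if PySem.List.pyGetD e 0 0 ≤ PySem.List.pyGetD e 1 0 then PySem.List.pyGetD e 1 0 else PySem.List.pyGetD e 0 0), (PySem.List.pyGetD e 2 0))] else acc) network PySem.Dict.empty []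
  rw [hp]
  dsimp only
  have hdict : network.foldl (fun (d : PySem.Dict Int Int) (e : List Int) =>
      if (if PySem.List.pyGetD e 0 0 ≤ PySem.List.pyGetD e 1 0 then PySem.List.pyGetD e 0 0 else PySem.List.pyGetD e 1 0) == 1 && (if PySem.List.pyGetD e 0 0 ≤ PySem.List.pyGetD e 1 0 then PySem.List.pyGetD e 1 0 else PySem.List.pyGetD e 0 0) ≤ n then d.insert (if PySem.List.pyGetD e 0 0 ≤ PySem.List.pyGetD e 1 0 then PySem.List.pyGetD e 1 0 else PySem.List.pyGetD e 0 0) (PySem.List.pyGetD e 2 0) else d) PySem.Dict.empty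
      = (network.map pvTrip).foldl
          (fun d t => if t.1 == 1 && t.2.1 ≤ n then d.insert t.2.1 t.2.2 else d) PySem.Dict.empty := by
    rw [List.foldl_map]
    apply PySem.List.foldl_congr_mem'
    intro e _ d
    simp only [pvTrip, min_def, max_def]
  have hedges : network.foldl (fun (acc : List (Int × Int × Int)) (e : List Int) =>
      if 1 ≤ (if PySem.List.pyGetD e 0 0 ≤ PySem.List.pyGetD e 1 0 then PySem.List.pyGetD e 0 0 else PySem.List.pyGetD e 1 0) && (if PySem.List.pyGetD e 0 0 ≤ PySem.List.pyGetD e 1 0 then PySem.List.pyGetD e 0 0 else PySem.List.pyGetD e 1 0) < (if PySem.List.pyGetD e 0 0 ≤ PySem.List.pyGetD e 1 0 then PySem.List.pyGetD e 1 0 else PySem.List.pyGetD e 0 0) && (if PySem.List.pyGetD e 0 0 ≤ PySem.List.pyGetD e 1 0 then PySem.List.pyGetD e 1 0 else PySem.List.pyGetD e 0 0) ≤ n then acc ++ [((if PySem.List.pyGetD e 0 0 ≤ PySem.List.pyGetD e 1 0 then PySem.List.pyGetD e 0 0 else PySem.List.pyGetD e 1 0), (if PySem.List.pyGetD e 0 0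 ≤ PySem.List.pyGetD e 1 0 then PySem.List.pyGetD e 1 0 else PySem.List.pyGetD e 0 0), PySem.List.pyGetD e 2 0)] else acc) ([] : List (Int × Int × Int))
      = (network.map pvTrip).filter (pvCondN n) := by
    have h1 : network.foldl (fun (acc : List (Int × Int × Int)) (e : List Int) =>
      if 1 ≤ (if PySem.List.pyGetD e 0 0 ≤ PySem.List.pyGetD e 1 0 then PySem.List.pyGetD e 0 0 else PySem.List.pyGetD e 1 0) && (if PySem.List.pyGetD e 0 0 ≤ PySem.List.pyGetD e 1 0 then PySem.List.pyGetD e 0 0 else PySem.List.pyGetD e 1 0) < (if PySem.List.pyGetD e 0 0 ≤ PySem.List.pyGetD e 1 0 then PySem.List.pyGetD e 1 0 else PySem.List.pyGetD e 0 0) && (if PySem.List.pyGetD e 0 0 ≤ PySem.List.pyGetD e 1 0 then PySem.List.pyGetD e 1 0 else PySem.List.pyGetD e 0 0) ≤ n then acc ++ [((if PySem.List.pyGetD e 0 0 ≤ PySem.List.pyGetD e 1 0 then PySem.List.pyGetD e 0 0 else PySem.List.pyGetD e 1 0), (if PySem.List.pyGetD e 0 0 ≤ PySem.List.pyGetD e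 1 0 then PySem.List.pyGetD e 1 0 else PySem.List.pyGetD e 0 0), PySem.List.pyGetD e 2 0)] else acc) ([] : List (Int × Int × Int))
        = network.foldl (fun acc e => if pvCondN n (pvTrip e) = true then acc ++ [pvTrip e] else acc) [] := by
      apply PySem.List.foldl_congr_mem'
      intro e _ acc
      simp only [pvTrip, pvCondN, min_def, max_def]
    rw [h1, PySem.List.foldl_append_if, List.nil_append, List.filter_map]
    rfl
  rw [hdict, hedges, pvRange1 n (by omega), List.map_map]
  have hdp0 : (List.range n.toNat).map ((fun v => ((network.map pvTrip).foldl
          (fun d t => if t.1 == 1 && t.2.1 ≤ n then d.insert t.2.1 t.2.2 else d)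
          PySem.Dict.empty).getD v 100000) ∘ (fun (k : Nat) => (k : Int) + 1))
      = (List.range n.toNat).map (pvValP (network.map pvTrip) []) := by
    apply List.map_congr_left
    intro k hk
    have hk' := List.mem_range.mp hk
    show ((network.map pvTrip).foldl
        (fun d t => if t.1 == 1 && t.2.1 ≤ n then d.insert t.2.1 t.2.2 else d)
        PySem.Dict.empty).getD ((k : Int) + 1) 100000 = pvValP (network.map pvTrip) [] k
    rw [PySem.Dict.getD_eq_get?_getD,
        pvDirectGet n (network.map pvTrip) _ ((k : Int) + 1) (by omega) (by omega),
        PySem.Dict.get?_empty, Option.or_none, ← List.getLastD_eq_getLast?]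
    rfl
  rw [hdp0,
      show PySem.List.sorted ((network.map pvTrip).filter (pvCondN n)) (fun t => t.1) false
        = pvSB n (network.map pvTrip) from rfl,
      pvPushLoop n (network.map pvTrip) n.toNat hN h2 (pvSB n (network.map pvTrip)) []
        (List.nil_append _).symm]
  have hc : n - 1 = (((n.toNat - 1 : Nat)) : Int) := by omega
  rw [hc, pvGetMapRange _ _ _ (by omega), pvPushAll n _ _ (by omega)]

-- ===== VERDICT (by name: the statement is the Claim_ definition above) =====
theorem computerNetwork_spec : Claim_equal_computerNetwork := by
  intro n network _ hPre
  obtain ⟨h1, hcase⟩ := hPre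
  unfold Spec_computerNetwork
  by_cases hn1 : n = 1
  · subst hn1; rfl
  · have hLen : ∀ e ∈ network, 3 ≤ e.length := by
      rcases hcase with h | h
      · exact absurd h hn1
      · exact h
    have h2 : 2 ≤ n := by omega
    rw [pvAeval n network h2 hLen, pvBeval n network h2]
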